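-- pv_equiv track=rewrite | github.com/ServiceNow/hdlm | hdlm/metaschedule.py | _get_shifts
-- ===== SOURCE A (Python) =====
-- from typing import Sequence, Optional, NamedTuple
--
-- def _get_shifts(steps: Sequence[Sequence[int]]) -> tuple[int]:
--     shifts = [0]
--     for step in steps:
--         # Count the number of zeros at the beginning of `step`
--         shifts.append(shifts[-1])
--         for x in step:
--             if x == 0:
--                 shifts[-1] += 1
--             else:
--                 break
--     return tuple(shifts)
-- ===== SOURCE B (Python) =====
-- def _get_shifts(steps):
--     # Recursive decomposition: shifts for (head :: rest) are 0 followed by the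
--     # shifts of rest, each offset by head's leading-zero run length (index of
--     # the first nonzero, or len(head) if there is none).
--     if not steps:
--         return (0,)
--     head, rest = steps[0], steps[1:]
--     c = next((i for i, x in enumerate(head) if x != 0), len(head))
--     return (0,) + tuple(v + c for v in _get_shifts(rest))
-- ===== Notes on version B (the rewrite author's own statement) =====
-- stated objective: alternative
-- what changed: Replaces A's single forward pass threading a mutable running-total list with a structural recursion on the step list that builds the result back-to-front, offsetting the recursively computed tail by the head's first-nonzero index via a map.
import Mathlib
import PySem

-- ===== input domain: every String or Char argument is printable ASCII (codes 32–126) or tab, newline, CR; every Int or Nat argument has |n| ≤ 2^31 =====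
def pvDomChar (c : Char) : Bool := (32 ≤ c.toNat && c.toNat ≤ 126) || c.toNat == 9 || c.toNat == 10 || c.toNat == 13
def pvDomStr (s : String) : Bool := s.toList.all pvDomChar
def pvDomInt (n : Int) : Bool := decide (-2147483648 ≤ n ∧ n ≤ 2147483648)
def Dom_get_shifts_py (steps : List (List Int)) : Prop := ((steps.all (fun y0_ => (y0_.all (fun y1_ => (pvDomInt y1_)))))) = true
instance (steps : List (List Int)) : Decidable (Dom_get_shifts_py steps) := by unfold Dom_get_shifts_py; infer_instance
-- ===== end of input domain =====

-- B replaces A's forward pass (mutable list carrying the running total) with a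
-- structural recursion building the result back-to-front, offsetting the tail
-- by the head step's first-nonzero index; objective: alternative decomposition.

-- ===== PORT A =====
-- shifts[-1] += 1 : increment the last element of the list
def pvIncLast (l : List Int) : List Int :=
  match l with
  | [] => []
  | [a] => [a + 1]
  | a :: rest => a :: pvIncLast rest

-- inner 'for x in step: if x == 0: shifts[-1] += 1 else: break'
def pvInnerA (step : List Int) (shifts : List Int) : List Int :=
  match step with
  | [] => shifts
  | x :: rest => if x == 0 then pvInnerA rest (pvIncLast shifts) else shifts

def get_shifts_py (steps : List (List Int)) : List Int :=
  steps.foldl (fun shifts step => pvInnerA step (shifts ++ [shifts.getLastD 0])) [0]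

-- ===== PORT B =====
-- next((i for i, x in enumerate(head) if x != 0), len(head)):
-- index of the first nonzero element, or the length if none
def pvFirstNonzero (step : List Int) : Int :=
  match step with
  | [] => 0
  | x :: rest => if x ≠ 0 then 0 else 1 + pvFirstNonzero rest

def get_shifts_py_alt (steps : List (List Int)) : List Int :=
  match steps with
  | [] => [0]
  | head :: rest => 0 :: (get_shifts_py_alt rest).map (· + pvFirstNonzero head)

-- ===== PRECONDITION & SPEC =====
def Spec_get_shifts_py (steps : List (List Int)) (out : List Int) : Prop := out = get_shifts_py_alt steps
instance (steps : List (List Int)) (out : List Int) : Decidable (Spec_get_shifts_py steps out) := by unfold Spec_get_shifts_py; infer_instance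

-- ===== CLAIM (what is proved, stated in full; the proofs are below) =====
def Claim_equal_get_shifts_py : Prop := ∀ (steps : List (List Int)), Dom_get_shifts_py steps → Spec_get_shifts_py steps (get_shifts_py steps)

-- ===== LEMMAS AND PROOFS =====

theorem pvIncLast_concat (l : List Int) (t : Int) : pvIncLast (l ++ [t]) = l ++ [t + 1] := by
  induction l with
  | nil => simp [pvIncLast]
  | cons a rest ih =>
      cases rest with
      | nil => simp [pvIncLast]
      | cons b r => simpa [pvIncLast] using ih

theorem pvInnerA_concat (step : List Int) (l : List Int) (t : Int) :
    pvInnerA step (l ++ [t]) = l ++ [t + pvFirstNonzero step] := by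
  induction step generalizing t with
  | nil => simp [pvInnerA, pvFirstNonzero]
  | cons x rest ih =>
      by_cases hx : x = 0
      · simp [pvInnerA, hx, pvIncLast_concat, ih, pvFirstNonzero]
        ring
      · simp [pvInnerA, pvFirstNonzero, hx]

theorem getLastD_concat' (l : List Int) (t : Int) : (l ++ [t]).getLastD 0 = t := by
  induction l with
  | nil => rfl
  | cons a rest ih =>
      cases rest with
      | nil => rfl
      | cons b r => simpa using ih

theorem foldlA_eq (steps : List (List Int)) (l : List Int) (t : Int) :
    steps.foldl (fun shifts step => pvInnerA step (shifts ++ [shifts.getLastD 0])) (l ++ [t])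
      = l ++ (get_shifts_py_alt steps).map (· + t) := by
  induction steps generalizing l t with
  | nil => simp [get_shifts_py_alt]
  | cons s rest ih =>
      have h1 : pvInnerA s ((l ++ [t]) ++ [(l ++ [t]).getLastD 0]) = (l ++ [t]) ++ [t + pvFirstNonzero s] := by
        rw [getLastD_concat', pvInnerA_concat]
      simp only [List.foldl_cons, h1, ih]
      simp [get_shifts_py_alt, List.map_map]
      intro a _
      ring

-- ===== VERDICT (by name: the statement is the Claim_ definition above) =====
theorem get_shifts_py_spec : Claim_equal_get_shifts_py := by
  intro steps _
  unfold Spec_get_shifts_py get_shifts_py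
  have := foldlA_eq steps [] 0
  simpa using this
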